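-- pv_equiv track=rewrite | github.com/1st-award/codetree-TILs | 240109/한 가지로 열리는 자물쇠/one-way-lock.py | solution
-- ===== SOURCE A (Python) =====
-- def solution(N, a, b, c):
--     count = 0
--     for x in range(1, N+1):
--         for y in range(1, N+1):
--             for z in range(1, N+1):
--                 diff_a = abs(a - x)
--                 diff_b = abs(b - y)
--                 diff_c = abs(c - z)
--                 if diff_a <= 2 or diff_b <= 2 or diff_c <= 2:
--                     count += 1
--     return count
-- ===== SOURCE B (Python) =====
-- def solution(N, a, b, c):
--     # Closed form: complement counting. A triple (x,y,z) in [1,N]^3 fails the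
--     # condition iff every coordinate is out of range; count those with a product.
--     if N <= 0:
--         return 0
--     def near(v):
--         # number of t in [1..N] with |v - t| <= 2
--         return max(0, min(N, v + 2) - max(1, v - 2) + 1)
--     return N ** 3 - (N - near(a)) * (N - near(b)) * (N - near(c))
-- ===== Notes on version B (the rewrite author's own statement) =====
-- stated objective: faster
-- what changed: Replaced the triple nested loop over [1,N]^3 by a closed-form complement count: N^3 minus the product of the per-coordinate out-of-range counts, each an interval-overlap formula.
import Mathlib
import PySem

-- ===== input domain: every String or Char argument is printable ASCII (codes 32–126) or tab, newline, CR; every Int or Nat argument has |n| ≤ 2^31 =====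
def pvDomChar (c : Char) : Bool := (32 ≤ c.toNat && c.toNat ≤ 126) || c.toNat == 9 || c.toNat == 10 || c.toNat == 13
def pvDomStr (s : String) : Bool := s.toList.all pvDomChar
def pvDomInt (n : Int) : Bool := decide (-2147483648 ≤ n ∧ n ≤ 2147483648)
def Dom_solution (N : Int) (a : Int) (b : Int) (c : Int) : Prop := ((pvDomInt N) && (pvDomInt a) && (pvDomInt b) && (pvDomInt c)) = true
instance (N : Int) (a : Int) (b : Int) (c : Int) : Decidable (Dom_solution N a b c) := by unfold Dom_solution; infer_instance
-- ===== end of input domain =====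

-- B replaces A's O(N^3) triple loop by an O(1) closed-form complement count (faster, asymptotic).


-- ===== PORT A =====
def solution (N : Int) (a : Int) (b : Int) (c : Int) : Int :=
  (PySem.List.pyRange 1 (N+1) 1).foldl (fun count x =>
    (PySem.List.pyRange 1 (N+1) 1).foldl (fun count y =>
      (PySem.List.pyRange 1 (N+1) 1).foldl (fun count z =>
        let diff_a := |a - x|
        let diff_b := |b - y|
        let diff_c := |c - z|
        if diff_a ≤ 2 ∨ diff_b ≤ 2 ∨ diff_c ≤ 2 then count + 1 else count)
        count) count) 0

-- ===== PORT B =====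
-- number of t in [1..N] with |v - t| ≤ 2 (interval overlap)
def nearCnt (N v : Int) : Int := max 0 (min N (v + 2) - max 1 (v - 2) + 1)

def solution_alt (N : Int) (a : Int) (b : Int) (c : Int) : Int :=
  if N ≤ 0 then 0
  else N ^ 3 - (N - nearCnt N a) * (N - nearCnt N b) * (N - nearCnt N c)

-- ===== PRECONDITION & SPEC =====
def Spec_solution (N : Int) (a : Int) (b : Int) (c : Int) (out : Int) : Prop := out = solution_alt N a b c
instance (N : Int) (a : Int) (b : Int) (c : Int) (out : Int) : Decidable (Spec_solution N a b c out) := by unfold Spec_solution; infer_instance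

-- ===== CLAIM (what is proved, stated in full; the proofs are below) =====
def Claim_equal_solution : Prop := ∀ (N : Int) (a : Int) (b : Int) (c : Int), Dom_solution N a b c → Spec_solution N a b c (solution N a b c)

-- ===== LEMMAS AND PROOFS =====

-- nearCnt at 0 and its step
theorem nearCnt_zero (v : Int) : nearCnt 0 v = 0 := by
  unfold nearCnt; omega

theorem nearCnt_succ (n : ℕ) (v : Int) :
    nearCnt ((n : Int) + 1) v = nearCnt n v + (if |v - ((n : Int) + 1)| ≤ 2 then 1 else 0) := by
  unfold nearCnt
  split_ifs with h <;> rw [abs_le] at h <;> omega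

-- generic sum of a two-valued function of the condition (P ∨ |v - y| ≤ 2)
theorem sum_two_valued (P : Prop) [Decidable P] (n : ℕ) (v A B : Int) :
    ((PySem.List.pyRange 1 ((n : Int) + 1) 1).map
        (fun y => if P ∨ |v - y| ≤ 2 then A else B)).sum
      = if P then (n : Int) * A else nearCnt n v * A + ((n : Int) - nearCnt n v) * B := by
  by_cases hP : P
  · simp only [hP, true_or, if_true, List.map_const']
    rw [List.sum_replicate, PySem.List.length_pyRange_one]
    rw [show ((n : Int) + 1 - 1) = (n : Int) by ring]
    simp
  · simp only [hP, false_or, if_false]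
    induction n with
    | zero => simp [PySem.List.pyRange_one_eq_nil, nearCnt_zero]
    | succ m ih =>
        rw [show ((m + 1 : ℕ) : Int) + 1 = ((m : Int) + 1) + 1 by omega,
          PySem.List.pyRange_one_succ_right (by omega)]
        simp only [List.map_append, List.sum_append, List.map_cons, List.map_nil,
          List.sum_cons, List.sum_nil, ih]
        rw [show ((m + 1 : ℕ) : Int) = (m : Int) + 1 by omega, nearCnt_succ]
        split_ifs <;> ring

-- the innermost (z) loop, in closed form
theorem zloop (P : Prop) [Decidable P] (n : ℕ) (v : Int) (count : Int) :
    (PySem.List.pyRange 1 ((n : Int) + 1) 1).foldl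
        (fun cnt z => if P ∨ |v - z| ≤ 2 then cnt + 1 else cnt) count
      = count + (if P then (n : Int) else nearCnt n v) := by
  rw [PySem.List.foldl_congr_mem _ _
      (fun cnt z => cnt + (if P ∨ |v - z| ≤ 2 then (1 : Int) else 0)) _
      (by intro acc x _; dsimp only; split_ifs <;> omega),
    PySem.List.foldl_add]
  have h := sum_two_valued P n v 1 0
  simp only [mul_one, mul_zero, add_zero] at h
  rw [h]

theorem solution_eq_alt (n : ℕ) (a b c : Int) :
    solution (n : Int) a b c = solution_alt (n : Int) a b c := by
  rcases Nat.eq_zero_or_pos n with h0 | hpos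
  · subst h0
    simp [solution, solution_alt, PySem.List.pyRange_one_eq_nil]
  · unfold solution solution_alt
    have hz : ∀ (x y cnt : Int),
        (PySem.List.pyRange 1 ((n : Int) + 1) 1).foldl
            (fun cnt z => if |a - x| ≤ 2 ∨ |b - y| ≤ 2 ∨ |c - z| ≤ 2 then cnt + 1 else cnt) cnt
          = cnt + (if |a - x| ≤ 2 ∨ |b - y| ≤ 2 then (n : Int) else nearCnt n c) := by
      intro x y cnt
      have h := zloop (|a - x| ≤ 2 ∨ |b - y| ≤ 2) n c cnt
      simp only [or_assoc] at h
      exact h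
    have hy : ∀ (x cnt : Int),
        (PySem.List.pyRange 1 ((n : Int) + 1) 1).foldl
            (fun cnt y => (PySem.List.pyRange 1 ((n : Int) + 1) 1).foldl
              (fun cnt z => if |a - x| ≤ 2 ∨ |b - y| ≤ 2 ∨ |c - z| ≤ 2 then cnt + 1 else cnt) cnt) cnt
          = cnt + (if |a - x| ≤ 2 then (n : Int) * (n : Int)
                   else nearCnt n b * (n : Int) + ((n : Int) - nearCnt n b) * nearCnt n c) := by
      intro x cnt
      rw [PySem.List.foldl_congr_mem _ _
          (fun cnt y => cnt + (if |a - x| ≤ 2 ∨ |b - y| ≤ 2 then (n : Int) else nearCnt n c)) _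
          (fun acc y _ => hz x y acc),
        PySem.List.foldl_add,
        sum_two_valued (|a - x| ≤ 2) n b (n : Int) (nearCnt n c)]
    rw [PySem.List.foldl_congr_mem _ _
        (fun cnt x => cnt + (if |a - x| ≤ 2 then (n : Int) * (n : Int)
          else nearCnt n b * (n : Int) + ((n : Int) - nearCnt n b) * nearCnt n c)) _
        (fun acc x _ => hy x acc),
      PySem.List.foldl_add]
    have h := sum_two_valued False n a
      ((n : Int) * (n : Int))
      (nearCnt n b * (n : Int) + ((n : Int) - nearCnt n b) * nearCnt n c)
    simp only [false_or, if_false] at h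
    rw [h]
    have hn : ¬ ((n : Int) ≤ 0) := by exact_mod_cast Nat.not_le.mpr hpos
    rw [if_neg hn]
    ring

-- ===== VERDICT (by name: the statement is the Claim_ definition above) =====
theorem solution_spec : Claim_equal_solution := by
  intro N a b c _
  unfold Spec_solution
  by_cases h : N ≤ 0
  · have hnil : PySem.List.pyRange 1 (N + 1) 1 = [] :=
      PySem.List.pyRange_one_eq_nil (by omega)
    simp [solution, solution_alt, hnil, h]
  · obtain ⟨n, rfl⟩ : ∃ n : ℕ, N = (n : Int) := ⟨N.toNat, by omega⟩
    exact solution_eq_alt n a b c
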